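-- pv_equiv track=rewrite | github.com/sumina729/ProblemSolving | 백준/Gold/1081. 합/합.py | digit_sum_upto
-- ===== SOURCE A (Python) =====
-- def digit_sum_upto(n):
--     """0 ~ n까지 모든 수의 각 자리수 합"""
--     if n < 0:
--         return 0
--     if n < 10:
--         return n * (n + 1) // 2
--
--     # p = 10^k (n의 최상위 자리수 자릿값)
--     p = 1
--     while p * 10 <= n:
--         p *= 10
--
--     msd = n // p   # most significant digit
--     r = n % p      # remainder
--
--     # S(10^d - 1) = d * 45 * 10^(d-1)
--     d = len(str(p)) - 1
--     S_p_minus_1 = d * 45 * (p // 10) if d > 0 else 0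
--
--     return (msd * S_p_minus_1
--             + (msd * (msd - 1) // 2) * p
--             + msd * (r + 1)
--             + digit_sum_upto(r))
-- ===== SOURCE B (Python) =====
-- def digit_sum_upto(n):
--     """0 ~ n까지 모든 수의 각 자리수 합"""
--     if n < 0:
--         return 0
--     total = 0
--     p = 1
--     while p <= n:
--         high = n // (p * 10)
--         cur = (n // p) % 10
--         low = n % p
--         total += high * 45 * p + (cur * (cur - 1) // 2) * p + cur * (low + 1)
--         p *= 10
--     return total
-- ===== Notes on version B (the rewrite author's own statement) =====
-- stated objective: alternative
-- what changed: Replaces the recursive most-significant-digit decomposition (find top power of 10, recurse on the remainder, with a string-length digit count) with a single non-recursive loop over place values least-to-most significant, accumulating each position's closed-form contribution.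
import Mathlib
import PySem

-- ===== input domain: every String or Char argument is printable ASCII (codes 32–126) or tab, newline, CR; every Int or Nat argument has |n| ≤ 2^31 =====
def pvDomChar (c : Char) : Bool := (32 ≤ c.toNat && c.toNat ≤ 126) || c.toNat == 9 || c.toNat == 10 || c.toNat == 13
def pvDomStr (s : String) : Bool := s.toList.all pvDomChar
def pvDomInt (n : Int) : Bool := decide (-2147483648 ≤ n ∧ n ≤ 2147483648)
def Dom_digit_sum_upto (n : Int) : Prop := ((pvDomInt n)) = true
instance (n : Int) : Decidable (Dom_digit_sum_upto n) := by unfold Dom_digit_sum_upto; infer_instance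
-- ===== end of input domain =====

-- B replaces A's recursive MSD decomposition with one iterative loop over place values; alternative decomposition, same cost.
-- The Nat 'fuel' arguments only make the Python loops/recursion total (fuel n.toNat+1 is always enough: each loop
-- multiplies p by 10 while p ≤ n, and each recursive call strictly decreases the nonnegative argument).

-- ===== PORT A =====
-- the 'while p * 10 <= n: p *= 10' loop of A
def findPF : Nat → Int → Int → Int
  | 0, _, p => p
  | fuel + 1, n, p => if p * 10 ≤ n then findPF fuel n (p * 10) else p

-- A's recursion (the fuel bound is never hit: the recursive argument r satisfies 0 ≤ r < n)
def digitSumF : Nat → Int → Int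
  | 0, _ => 0
  | fuel + 1, n =>
    if n < 0 then 0
    else if n < 10 then PySem.Int.floordiv (n * (n + 1)) 2
    else
      let p := findPF (n.toNat + 1) n 1
      let msd := PySem.Int.floordiv n p
      let r := PySem.Int.mod n p
      let d := PySem.Str.len (PySem.Int.toStr p) - 1
      let S := if 0 < d then d * 45 * (PySem.Int.floordiv p 10) else 0
      msd * S + PySem.Int.floordiv (msd * (msd - 1)) 2 * p + msd * (r + 1) + digitSumF fuel r

def digit_sum_upto (n : Int) : Int := digitSumF (n.toNat + 1) n

-- ===== PORT B =====
-- the 'while p <= n: … ; p *= 10' loop of B, carrying the running total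
def loopBF : Nat → Int → Int → Int → Int
  | 0, _, total, _ => total
  | fuel + 1, n, total, p =>
    if p ≤ n then
      let high := PySem.Int.floordiv n (p * 10)
      let cur := PySem.Int.mod (PySem.Int.floordiv n p) 10
      let low := PySem.Int.mod n p
      loopBF fuel n (total + (high * 45 * p + PySem.Int.floordiv (cur * (cur - 1)) 2 * p + cur * (low + 1))) (p * 10)
    else total

def digit_sum_upto_alt (n : Int) : Int :=
  if n < 0 then 0 else loopBF (n.toNat + 1) n 0 1

-- ===== PRECONDITION & SPEC =====
def Spec_digit_sum_upto (n : Int) (out : Int) : Prop := out = digit_sum_upto_alt n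
instance (n : Int) (out : Int) : Decidable (Spec_digit_sum_upto n out) := by unfold Spec_digit_sum_upto; infer_instance

-- ===== CLAIM (what is proved, stated in full; the proofs are below) =====
def Claim_equal_digit_sum_upto : Prop := ∀ (n : Int), Dom_digit_sum_upto n → Spec_digit_sum_upto n (digit_sum_upto n)

-- ===== LEMMAS AND PROOFS =====

theorem findPF_ge : ∀ (fuel : Nat) (n p : Int), 0 < p → p ≤ findPF fuel n p := by
  intro fuel
  induction fuel with
  | zero => intro n p hp; simp [findPF]
  | succ f ihf =>
      intro n p hp
      rw [findPF]
      split_ifs with h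
      · have := ihf n (p * 10) (by omega)
        omega
      · omega

theorem findPF_le : ∀ (fuel : Nat) (n p : Int), p ≤ n → findPF fuel n p ≤ n := by
  intro fuel
  induction fuel with
  | zero => intro n p h; simpa [findPF] using h
  | succ f ihf =>
      intro n p h
      rw [findPF]
      split_ifs with h2
      · exact ihf n (p * 10) h2
      · exact h

theorem findPF_gt : ∀ (fuel : Nat) (n p : Int), 0 < p → n < p * 10 ^ fuel → n < findPF fuel n p * 10 := by
  intro fuel
  induction fuel with
  | zero =>
      intro n p hp h
      rw [pow_zero, mul_one] at h
      rw [findPF]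
      nlinarith
  | succ f ihf =>
      intro n p hp h
      rw [findPF]
      split_ifs with h2
      · exact ihf n (p * 10) (by omega) (by rw [pow_succ] at h; nlinarith)
      · omega

theorem findPF_pow : ∀ (fuel : Nat) (n p : Int), (∃ k : Nat, p = 10 ^ k) →
    ∃ d : Nat, findPF fuel n p = 10 ^ d := by
  intro fuel
  induction fuel with
  | zero => intro n p hk; simpa [findPF] using hk
  | succ f ihf =>
      intro n p hk
      rw [findPF]
      split_ifs with h
      · obtain ⟨k, rfl⟩ := hk
        exact ihf n _ ⟨k + 1, by rw [pow_succ]⟩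
      · exact hk

-- fuel n.toNat + 1 is always enough: n < 10 ^ (n.toNat + 1)
theorem pow_fuel_big (n : Int) : n < 1 * 10 ^ (n.toNat + 1) := by
  have h1 : n.toNat < 10 ^ n.toNat := Nat.lt_pow_self (by omega)
  have h2 : (10:Nat) ^ n.toNat ≤ 10 ^ (n.toNat + 1) := Nat.pow_le_pow_right (by omega) (by omega)
  have h3 : (n.toNat : Int) < ((10:Nat) ^ (n.toNat + 1) : Nat) := by exact_mod_cast Nat.lt_of_lt_of_le h1 h2
  push_cast at h3
  omega

-- one place value's contribution, in Euclidean division (equal to floor division: all divisors are positive)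
def termE (n q : Int) : Int :=
  n / (q * 10) * 45 * q + (n / q % 10) * ((n / q % 10) - 1) / 2 * q + (n / q % 10) * (n % q + 1)

-- the sum of termE over place values q, q*10, q*100, … ≤ n (loopBF with the accumulator eliminated; proof-side only)
def sumB (n q : Int) : Int :=
  if _h : 0 < q ∧ q ≤ n then termE n q + sumB n (q * 10) else 0
termination_by (n + 1 - q).toNat
decreasing_by omega

theorem sumB_of_gt (n q : Int) (h : ¬ q ≤ n) : sumB n q = 0 := by
  rw [sumB]
  simp [h]

theorem loopBF_eq_sumB : ∀ (fuel : Nat) (n total p : Int), 0 < p → n < p * 10 ^ fuel →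
    loopBF fuel n total p = total + sumB n p := by
  intro fuel
  induction fuel with
  | zero =>
      intro n total p hp hbig
      rw [loopBF, sumB_of_gt n p (by simpa using by omega)]
      ring
  | succ f ihf =>
      intro n total p hp hbig
      rw [loopBF]
      split_ifs with h
      · rw [ihf n _ (p * 10) (by omega) (by rw [pow_succ] at hbig; nlinarith)]
        conv_rhs => rw [sumB]
        rw [dif_pos (⟨hp, h⟩ : 0 < p ∧ p ≤ n), termE]
        rw [PySem.Int.floordiv_eq_ediv_of_pos (by omega : (0:Int) < p * 10),
            PySem.Int.floordiv_eq_ediv_of_pos hp,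
            PySem.Int.floordiv_eq_ediv_of_pos (by omega : (0:Int) < 2),
            PySem.Int.mod_eq_emod_of_pos (by omega : (0:Int) < 10),
            PySem.Int.mod_eq_emod_of_pos hp]
        ring
      · rw [sumB_of_gt n p h]; ring


-- unfolding of sumB valid also when q > n (then all three summands of termE are 0), for 0 ≤ n
theorem sumB_unfold (n q : Int) (hq : 0 < q) (hn : 0 ≤ n) :
    sumB n q = termE n q + sumB n (q * 10) := by
  by_cases h : q ≤ n
  · rw [sumB, dif_pos ⟨hq, h⟩]
  · rw [sumB_of_gt n q h, sumB_of_gt n (q * 10) (by omega)]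
    have h1 : n / q = 0 := Int.ediv_eq_zero_of_lt hn (by omega)
    have h2 : n / (q * 10) = 0 := Int.ediv_eq_zero_of_lt hn (by omega)
    simp [termE, h1, h2]

-- the key split: pulling the top digit m out of n = m * 10^(j+dlt) + r, place by place
theorem sumB_split (dlt : Nat) : ∀ (j : Nat) (m r : Int), 0 ≤ r → r < 10 ^ (j + dlt) → 1 ≤ m → m < 10 →
    sumB (m * 10 ^ (j + dlt) + r) ((10:Int) ^ j) =
      sumB r ((10:Int) ^ j)
        + (dlt : Int) * (m * 45 * ((10:Int) ^ (j + dlt) / 10))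
        + m * (m - 1) / 2 * 10 ^ (j + dlt) + m * (r + 1) := by
  induction dlt with
  | zero =>
      intro j m r hr hrP hm1 hm9
      rw [Nat.add_zero] at *
      have hq : (0:Int) < 10 ^ j := by positivity
      have hle : (10:Int) ^ j ≤ m * 10 ^ j + r := by nlinarith
      have hlt : m * 10 ^ j + r < 10 ^ j * 10 := by nlinarith
      rw [sumB, dif_pos ⟨hq, hle⟩]
      rw [sumB_of_gt _ _ (by omega), sumB_of_gt r _ (by omega)]
      have e1 : (m * 10 ^ j + r) / (10 ^ j * 10) = 0 :=
        Int.ediv_eq_zero_of_lt (by nlinarith) hlt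
      have e2 : (m * 10 ^ j + r) / 10 ^ j = m := by
        rw [show m * 10 ^ j + r = r + m * 10 ^ j by ring,
            Int.add_mul_ediv_right _ _ (ne_of_gt hq),
            Int.ediv_eq_zero_of_lt hr hrP, zero_add]
      have e3 : (m * 10 ^ j + r) % 10 ^ j = r := by
        rw [show m * 10 ^ j + r = r + m * 10 ^ j by ring,
            Int.add_mul_emod_self_right, Int.emod_eq_of_lt hr hrP]
      have e4 : m % 10 = m := Int.emod_eq_of_lt (by omega) (by omega)
      rw [termE, e1, e2, e3, e4]
      push_cast
      ring
  | succ k ih =>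
      intro j m r hr hrP hm1 hm9
      have hsame : j + (k + 1) = (j + 1) + k := by omega
      rw [hsame] at hrP ⊢
      have hq : (0:Int) < 10 ^ j := by positivity
      have hP : (0:Int) < 10 ^ (j + 1 + k) := by positivity
      have hqP : (10:Int) ^ j ≤ 10 ^ (j + 1 + k) := pow_le_pow_right₀ (by norm_num) (by omega)
      have hle : (10:Int) ^ j ≤ m * 10 ^ (j + 1 + k) + r := by nlinarith
      rw [sumB, dif_pos ⟨hq, hle⟩]
      rw [sumB_unfold r _ hq hr]
      have hsucc : (10:Int) ^ j * 10 = 10 ^ (j + 1) := by rw [pow_succ]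
      rw [hsucc, ih (j + 1) m r hr hrP hm1 hm9]
      have hPfac : (10:Int) ^ (j + 1 + k) = 10 ^ j * 10 * 10 ^ k := by
        rw [show j + 1 + k = (j + 1) + k by rfl, pow_add, pow_succ]
      have hd1 : (m * 10 ^ (j + 1 + k) + r) / (10 ^ j * 10) = r / (10 ^ j * 10) + m * 10 ^ k := by
        rw [show m * 10 ^ (j + 1 + k) + r = r + m * 10 ^ k * (10 ^ j * 10) by rw [hPfac]; ring,
            Int.add_mul_ediv_right _ _ (by positivity : (10:Int) ^ j * 10 ≠ 0)]
      have hd2 : (m * 10 ^ (j + 1 + k) + r) / 10 ^ j % 10 = r / 10 ^ j % 10 := by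
        rw [show m * 10 ^ (j + 1 + k) + r = r + m * (10 * 10 ^ k) * 10 ^ j by rw [hPfac]; ring,
            Int.add_mul_ediv_right _ _ (ne_of_gt hq),
            show r / 10 ^ j + m * (10 * 10 ^ k) = r / 10 ^ j + m * 10 ^ k * 10 by ring,
            Int.add_mul_emod_self_right]
      have hd3 : (m * 10 ^ (j + 1 + k) + r) % 10 ^ j = r % 10 ^ j := by
        rw [show m * 10 ^ (j + 1 + k) + r = r + m * (10 * 10 ^ k) * 10 ^ j by rw [hPfac]; ring,
            Int.add_mul_emod_self_right]
      have hdiv10 : (10:Int) ^ (j + 1 + k) / 10 = 10 ^ (j + k) := by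
        rw [show j + 1 + k = (j + k) + 1 by omega, pow_succ,
            Int.mul_ediv_cancel _ (by norm_num)]
      rw [termE, hd1, hd2, hd3, termE, hdiv10,
          show (10:Int) ^ (j + k) = 10 ^ j * 10 ^ k by rw [← pow_add]]
      push_cast
      ring

-- digitSumF does not depend on the fuel once the fuel exceeds n
theorem digitSumF_congr : ∀ (N : Nat), ∀ (n : Int) (a b : Nat), n.toNat ≤ N → n.toNat < a → n.toNat < b →
    digitSumF a n = digitSumF b n := by
  intro N
  induction N using Nat.strong_induction_on with
  | _ N ih =>
    intro n a b hN ha hb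
    obtain ⟨a', rfl⟩ : ∃ a', a = a' + 1 := ⟨a - 1, by omega⟩
    obtain ⟨b', rfl⟩ : ∃ b', b = b' + 1 := ⟨b - 1, by omega⟩
    by_cases h0 : n < 0
    · rw [digitSumF, digitSumF, if_pos h0, if_pos h0]
    · by_cases h10 : n < 10
      · rw [digitSumF, digitSumF, if_neg h0, if_neg h0, if_pos h10, if_pos h10]
      · simp only [digitSumF, if_neg h0, if_neg h10]
        have hp1 : (0:Int) < findPF (n.toNat + 1) n 1 :=
          lt_of_lt_of_le one_pos (findPF_ge (n.toNat + 1) n 1 one_pos)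
        have hple : findPF (n.toNat + 1) n 1 ≤ n := findPF_le (n.toNat + 1) n 1 (by omega)
        have hr : PySem.Int.mod n (findPF (n.toNat + 1) n 1) = n % findPF (n.toNat + 1) n 1 :=
          PySem.Int.mod_eq_emod_of_pos hp1
        have hr0 : 0 ≤ n % findPF (n.toNat + 1) n 1 := Int.emod_nonneg n (ne_of_gt hp1)
        have hrlt : n % findPF (n.toNat + 1) n 1 < findPF (n.toNat + 1) n 1 := Int.emod_lt_of_pos n hp1
        rw [hr, ih (n % findPF (n.toNat + 1) n 1).toNat (by omega) _ a' b' le_rfl (by omega) (by omega)]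

theorem main_eq : ∀ (N : Nat), ∀ n : Int, n.toNat ≤ N → Dom_digit_sum_upto n →
    digit_sum_upto n = digit_sum_upto_alt n := by
  intro N
  induction N using Nat.strong_induction_on with
  | _ N ih =>
    intro n hN hdom
    have hdn : -2147483648 ≤ n ∧ n ≤ 2147483648 := by
      simpa [Dom_digit_sum_upto, pvDomInt] using hdom
    by_cases hneg : n < 0
    · rw [digit_sum_upto, digitSumF, digit_sum_upto_alt, if_pos hneg, if_pos hneg]
    · rw [not_lt] at hneg
      have hB : digit_sum_upto_alt n = sumB n 1 := by
        rw [digit_sum_upto_alt, if_neg (by omega),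
            loopBF_eq_sumB (n.toNat + 1) n 0 1 one_pos (pow_fuel_big n), zero_add]
      by_cases h10 : n < 10
      · rw [digit_sum_upto, digitSumF, if_neg (by omega), if_pos h10, hB,
           PySem.Int.floordiv_eq_ediv_of_pos (by omega : (0:Int) < 2)]
        interval_cases n <;> simp [sumB, termE]
      · rw [not_lt] at h10
        obtain ⟨d, hPd⟩ : ∃ d : Nat, findPF (n.toNat + 1) n 1 = 10 ^ d :=
          findPF_pow (n.toNat + 1) n 1 ⟨0, by norm_num⟩
        have hPle : findPF (n.toNat + 1) n 1 ≤ n := findPF_le (n.toNat + 1) n 1 (by omega)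
        have hPgt : n < findPF (n.toNat + 1) n 1 * 10 := findPF_gt (n.toNat + 1) n 1 one_pos (pow_fuel_big n)
        have hPpos : (0:Int) < 10 ^ d := by positivity
        have hd1 : 1 ≤ d := by
          rcases Nat.eq_zero_or_pos d with h | h
          · rw [hPd, h] at hPgt; norm_num at hPgt; omega
          · omega
        have hd9 : d ≤ 9 := by
          by_contra hcon
          have h10d : (10:Int) ^ 10 ≤ 10 ^ d := pow_le_pow_right₀ (by norm_num) (by omega)
          have : (10:Int) ^ 10 = 10000000000 := by norm_num
          rw [hPd] at hPle
          omega
        obtain ⟨e, rfl⟩ : ∃ e : Nat, d = e + 1 := ⟨d - 1, by omega⟩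
        have hlen : PySem.Str.len (PySem.Int.toStr ((10:Int) ^ (e + 1))) - 1 = ((e + 1 : Nat) : Int) := by
          have he8 : e ≤ 8 := by omega
          interval_cases e <;> decide
        -- unfold A
        rw [digit_sum_upto, digitSumF, if_neg (by omega), if_neg (by omega)]
        simp only [hPd, hlen,
          PySem.Int.floordiv_eq_ediv_of_pos hPpos,
          PySem.Int.mod_eq_emod_of_pos hPpos,
          PySem.Int.floordiv_eq_ediv_of_pos (by norm_num : (0:Int) < 10),
          PySem.Int.floordiv_eq_ediv_of_pos (by norm_num : (0:Int) < 2)]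
        rw [if_pos (by exact_mod_cast hd1 : (0:Int) < ((e + 1 : Nat) : Int))]
        -- facts about msd = n / 10^(e+1) and r = n % 10^(e+1)
        rw [hPd] at hPle hPgt
        have hr0 : 0 ≤ n % 10 ^ (e + 1) := Int.emod_nonneg n (ne_of_gt hPpos)
        have hrP : n % 10 ^ (e + 1) < 10 ^ (e + 1) := Int.emod_lt_of_pos n hPpos
        have hmsd1 : 1 ≤ n / 10 ^ (e + 1) := by
          rw [Int.le_ediv_iff_mul_le hPpos, one_mul]; exact hPle
        have hmsd9 : n / 10 ^ (e + 1) < 10 := by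
          rw [Int.ediv_lt_iff_lt_mul hPpos]; omega
        have hn_eq : n = n / 10 ^ (e + 1) * 10 ^ (0 + (e + 1)) + n % 10 ^ (e + 1) := by
          rw [Nat.zero_add]
          have := Int.mul_ediv_add_emod n (10 ^ (e + 1))
          linarith
        -- unfold B via the split lemma
        have hsplit := sumB_split (e + 1) 0 (n / 10 ^ (e + 1)) (n % 10 ^ (e + 1)) hr0
          (by rw [Nat.zero_add]; exact hrP) hmsd1 hmsd9
        have hone : sumB n 1 = sumB (n / 10 ^ (e + 1) * 10 ^ (0 + (e + 1)) + n % 10 ^ (e + 1)) ((10:Int) ^ (0:Nat)) := by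
          rw [← hn_eq]; norm_num
        have hdiv10 : (10:Int) ^ (0 + (e + 1)) / 10 = 10 ^ e := by
          rw [Nat.zero_add, pow_succ, Int.mul_ediv_cancel _ (by norm_num)]
        have hdiv10b : (10:Int) ^ (e + 1) / 10 = 10 ^ e := by
          rw [pow_succ, Int.mul_ediv_cancel _ (by norm_num)]
        -- the recursive call: fuel does not matter, then the induction hypothesis applies
        have hdomr : Dom_digit_sum_upto (n % 10 ^ (e + 1)) := by
          simp only [Dom_digit_sum_upto, pvDomInt, decide_eq_true_eq]
          omega
        have hfuel : digitSumF n.toNat (n % 10 ^ (e + 1)) = digit_sum_upto (n % 10 ^ (e + 1)) := by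
          rw [digit_sum_upto]
          exact digitSumF_congr n.toNat (n % 10 ^ (e + 1)) n.toNat ((n % 10 ^ (e + 1)).toNat + 1)
            (by omega) (by omega) (by omega)
        have hIH : digit_sum_upto (n % 10 ^ (e + 1)) = digit_sum_upto_alt (n % 10 ^ (e + 1)) :=
          ih (n % 10 ^ (e + 1)).toNat (by omega) (n % 10 ^ (e + 1)) le_rfl hdomr
        have hBr : digit_sum_upto_alt (n % 10 ^ (e + 1)) = sumB (n % 10 ^ (e + 1)) 1 := by
          rw [digit_sum_upto_alt, if_neg (by omega),
              loopBF_eq_sumB _ _ 0 1 one_pos (pow_fuel_big _), zero_add]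
        have hone2 : sumB (n % 10 ^ (e + 1)) ((10:Int) ^ (0:Nat)) = sumB (n % 10 ^ (e + 1)) 1 := by norm_num
        rw [hB, hone, hsplit, hdiv10, hdiv10b, Nat.zero_add, hone2, hfuel, hIH, hBr]
        push_cast
        ring

-- ===== VERDICT (by name: the statement is the Claim_ definition above) =====
theorem digit_sum_upto_spec : Claim_equal_digit_sum_upto := by
  intro n hd
  unfold Spec_digit_sum_upto
  exact main_eq n.toNat n le_rfl hd
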